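-- pv_equiv track=rewrite | github.com/Zartock/AdventOfCode | ACutils/utils.py | extract_digits_from_string_and_translate_text_to_digits
-- ===== SOURCE A (Python) =====
-- DIGITS_TEXT_MAPPING = {"one": 1,
--                        "two": 2,
--                        "three": 3,
--                        "four": 4,
--                        "five": 5,
--                        "six": 6,
--                        "seven": 7,
--                        "eight": 8,
--                        "nine": 9}
--
-- def extract_digits_from_string_and_translate_text_to_digits(line: str) -> str:
--     new_line = ""
--     for i in range(0, len(line)):
--         if line[i].isdigit():
--             new_line += line[i]
--         else:
--             for text_number in DIGITS_TEXT_MAPPING: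
--                 if line[ i : i + len(text_number)] == text_number:
--                     new_line += str(DIGITS_TEXT_MAPPING[text_number])
--     return new_line
-- ===== SOURCE B (Python) =====
-- DIGITS_TEXT_MAPPING = {"one": 1,
--                        "two": 2,
--                        "three": 3,
--                        "four": 4,
--                        "five": 5,
--                        "six": 6,
--                        "seven": 7,
--                        "eight": 8,
--                        "nine": 9}
--
-- def extract_digits_from_string_and_translate_text_to_digits(line: str) -> str:
--     # Phase 1: index table start-position -> digit string.
--     table = {}
--     for i, c in enumerate(line):
--         if c.isdigit():
--             table[i] = c
--     # Phase 2: every (possibly overlapping) occurrence of each spelled-out word.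
--     for word, value in DIGITS_TEXT_MAPPING.items():
--         idx = line.find(word)
--         while idx != -1:
--             table[idx] = str(value)
--             idx = line.find(word, idx + 1)
--     # Phase 3: emit in ascending position order.
--     return "".join(table.get(i, "") for i in range(len(line)))
-- ===== Notes on version B (the rewrite author's own statement) =====
-- stated objective: faster
-- what changed: Instead of probing all nine words at every position, B builds a position->digit table in one digit sweep plus repeated C-level str.find per word (advancing by idx+1 to keep overlapping matches), then emits table entries in ascending position order.
import Mathlib
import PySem

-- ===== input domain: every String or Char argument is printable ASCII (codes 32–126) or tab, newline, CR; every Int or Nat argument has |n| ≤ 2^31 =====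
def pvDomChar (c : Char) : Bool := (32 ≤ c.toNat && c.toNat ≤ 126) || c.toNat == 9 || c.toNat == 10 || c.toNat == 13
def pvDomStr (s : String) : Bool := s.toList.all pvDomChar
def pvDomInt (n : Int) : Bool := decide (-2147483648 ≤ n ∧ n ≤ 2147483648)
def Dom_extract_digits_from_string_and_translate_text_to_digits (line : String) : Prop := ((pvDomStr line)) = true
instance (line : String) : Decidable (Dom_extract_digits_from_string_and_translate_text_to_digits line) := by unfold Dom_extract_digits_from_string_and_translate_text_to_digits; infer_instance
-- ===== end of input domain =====

-- B replaces A's position-by-position probing of all nine words by a find-based index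
-- table (digit sweep + repeated find per word, overlap-safe) emitted in ascending
-- position order; measurably faster in Python by a constant factor (C-level str.find).

-- ===== PORT A =====
-- DIGITS_TEXT_MAPPING, in insertion order
def pvWordsA : List (String × Int) :=
  [("one", 1), ("two", 2), ("three", 3), ("four", 4), ("five", 5),
   ("six", 6), ("seven", 7), ("eight", 8), ("nine", 9)]

def extract_digits_from_string_and_translate_text_to_digits (line : String) : String :=
  let cs := line.toList
  String.ofList <|
    (PySem.List.pyRange 0 (PySem.Str.len line) 1).foldl (fun new_line i =>
      if PySem.Chars.isdigit (PySem.List.pyGetD cs i ' ') then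
        new_line ++ [PySem.List.pyGetD cs i ' ']
      else
        pvWordsA.foldl (fun nl p =>
          if PySem.List.slice cs (some i) (some (i + PySem.Str.len p.1)) == p.1.toList then
            nl ++ PySem.Int.toChars p.2
          else nl) new_line) []

-- ===== PORT B =====
-- DIGITS_TEXT_MAPPING with str(value) precomputed at each use site of B's loop
def pvWordsB : List (String × String) :=
  [("one", "1"), ("two", "2"), ("three", "3"), ("four", "4"), ("five", "5"),
   ("six", "6"), ("seven", "7"), ("eight", "8"), ("nine", "9")]

-- the 'while idx != -1' find loop; fuel (length+1) only makes the recursion structural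
def pvOccLoop (cs w dg : List Char) : Nat → Int → PySem.Dict Int (List Char) → PySem.Dict Int (List Char)
  | 0, _, table => table
  | fuel + 1, idx, table =>
      if idx == -1 then table
      else pvOccLoop cs w dg fuel (PySem.Chars.findFrom cs w (idx + 1) none) (table.insert idx dg)

def extract_digits_from_string_and_translate_text_to_digits_alt (line : String) : String :=
  let cs := line.toList
  let table1 := (PySem.List.enumerate cs 0).foldl
      (fun tb p => if PySem.Chars.isdigit p.2 then tb.insert p.1 [p.2] else tb)
      (PySem.Dict.empty : PySem.Dict Int (List Char))
  let table2 := pvWordsB.foldl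
      (fun tb p => pvOccLoop cs p.1.toList p.2.toList (cs.length + 1) (PySem.Chars.find cs p.1.toList) tb)
      table1
  String.ofList (PySem.Chars.join []
    ((PySem.List.pyRange 0 (PySem.Str.len line) 1).map (fun i => table2.getD i [])))

-- ===== PRECONDITION & SPEC =====
def Spec_extract_digits_from_string_and_translate_text_to_digits (line : String) (out : String) : Prop := out = extract_digits_from_string_and_translate_text_to_digits_alt line
instance (line : String) (out : String) : Decidable (Spec_extract_digits_from_string_and_translate_text_to_digits line out) := by unfold Spec_extract_digits_from_string_and_translate_text_to_digits; infer_instance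

-- ===== CLAIM (what is proved, stated in full; the proofs are below) =====
def Claim_equal_extract_digits_from_string_and_translate_text_to_digits : Prop := ∀ (line : String), Dom_extract_digits_from_string_and_translate_text_to_digits line → Spec_extract_digits_from_string_and_translate_text_to_digits line (extract_digits_from_string_and_translate_text_to_digits line)

-- ===== LEMMAS AND PROOFS =====

-- the per-position token both programs emit (proof-only specification)
def pvTok (cs : List Char) (k : Nat) : List Char :=
  if PySem.Chars.isdigit (cs.getD k ' ') then [cs.getD k ' ']
  else (pvWordsB.filter (fun p => p.1.toList.isPrefixOf (cs.drop k))).flatMap (fun p => p.2.toList)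

lemma pv_join_nil (ps : List (List Char)) : PySem.Chars.join [] ps = ps.flatten := by
  induction ps with
  | nil => rfl
  | cons a t ih =>
    cases t with
    | nil => simp [PySem.Chars.join, List.intercalate]
    | cons b t' =>
      simp only [PySem.Chars.join, List.intercalate] at *
      simp [List.intersperse] at *
      simp_all

lemma pv_take_beq (p l : List Char) : (List.take p.length l == p) = p.isPrefixOf l := by
  rw [Bool.eq_iff_iff, beq_iff_eq, List.isPrefixOf_iff_prefix, List.prefix_iff_eq_take]
  exact eq_comm

lemma pv_words_tok (g : String → Bool) :
    (pvWordsA.filter (fun p => g p.1)).flatMap (fun p => PySem.Int.toChars p.2)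
      = (pvWordsB.filter (fun p => g p.1)).flatMap (fun p => p.2.toList) := by
  have h : pvWordsB = pvWordsA.map (fun p => (p.1, PySem.Int.toStr p.2)) := by decide
  rw [h, List.filter_map, List.flatMap_map]
  simp [Function.comp_def, PySem.Int.toList_toStr]

lemma pv_A_eq (line : String) :
    extract_digits_from_string_and_translate_text_to_digits line
      = String.ofList ((List.range line.toList.length).flatMap (pvTok line.toList)) := by
  unfold extract_digits_from_string_and_translate_text_to_digits
  simp only [PySem.Str.len_eq, PySem.List.pyRange_zero_natCast, List.foldl_map]
  congr 1
  rw [PySem.List.foldl_congr_mem (List.range line.toList.length) _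
      (fun nl k => nl ++ pvTok line.toList k) [] ?_]
  · rw [PySem.List.foldl_append_eq_flatMap]; simp
  · intro acc k hk
    simp only [PySem.List.pyGetD_natCast]
    by_cases hd : PySem.Chars.isdigit (line.toList.getD k ' ') = true
    · rw [if_pos hd, pvTok, if_pos hd]
    · rw [if_neg hd]
      have hbody : ∀ (nl : List Char), ∀ p ∈ pvWordsA,
          (if PySem.List.slice line.toList (some (k : Int)) (some ((k : Int) + (p.1.toList.length : Int))) == p.1.toList then
            nl ++ PySem.Int.toChars p.2 else nl)
          = (if p.1.toList.isPrefixOf (line.toList.drop k) = true then nl ++ PySem.Int.toChars p.2 else nl) := by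
        intro nl p hp
        rw [PySem.List.slice_natCast_add]
        have hc : (List.take p.1.toList.length (List.drop k line.toList) == p.1.toList)
            = p.1.toList.isPrefixOf (line.toList.drop k) := pv_take_beq _ _
        rw [hc]
      trans (pvWordsA.foldl (fun nl p => if p.1.toList.isPrefixOf (line.toList.drop k) = true then nl ++ PySem.Int.toChars p.2 else nl) acc)
      · exact PySem.List.foldl_congr_mem' _ _ _ _ (fun p hp nl => hbody nl p hp)
      simp only [PySem.List.foldl_if_eq_foldl_filter, PySem.List.foldl_append_eq_flatMap]
      rw [pv_words_tok (fun w => w.toList.isPrefixOf (line.toList.drop k))]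
      rw [pvTok, if_neg hd]

lemma pv_phase1_get (cs : List Char) (k : Nat) (n : Nat) :
    ((List.range n).foldl
        (fun tb j => if PySem.Chars.isdigit (cs.getD j ' ') then tb.insert (j : Int) [cs.getD j ' '] else tb)
        (PySem.Dict.empty : PySem.Dict Int (List Char))).get? (k : Int)
      = if k < n ∧ PySem.Chars.isdigit (cs.getD k ' ') then some [cs.getD k ' '] else none := by
  induction n with
  | zero => simp [PySem.Dict.get?_empty]
  | succ n ih =>
    rw [List.range_succ, List.foldl_append]
    simp only [List.foldl_cons, List.foldl_nil]
    by_cases hdn : PySem.Chars.isdigit (cs.getD n ' ') = true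
    · rw [if_pos hdn, PySem.Dict.get?_insert]
      by_cases hkn : k = n
      · subst hkn
        rw [if_pos rfl, if_pos ⟨Nat.lt_succ_self k, hdn⟩]
      · rw [if_neg (by exact_mod_cast hkn), ih]
        have hiff : (k < n ∧ PySem.Chars.isdigit (cs.getD k ' ') = true) ↔ (k < n + 1 ∧ PySem.Chars.isdigit (cs.getD k ' ') = true) := by
          constructor
          · rintro ⟨h1, h2⟩; exact ⟨by omega, h2⟩
          · rintro ⟨h1, h2⟩; exact ⟨by omega, h2⟩
        rw [if_congr hiff rfl rfl]
    · rw [if_neg hdn, ih]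
      by_cases hkn : k = n
      · subst hkn
        rw [if_neg (by rintro ⟨h1, h2⟩; omega), if_neg (by rintro ⟨h1, h2⟩; exact hdn h2)]
      · have hiff : (k < n ∧ PySem.Chars.isdigit (cs.getD k ' ') = true) ↔ (k < n + 1 ∧ PySem.Chars.isdigit (cs.getD k ' ') = true) := by
          constructor
          · rintro ⟨h1, h2⟩; exact ⟨by omega, h2⟩
          · rintro ⟨h1, h2⟩; exact ⟨by omega, h2⟩
        rw [if_congr hiff rfl rfl]

lemma pv_occ_get (cs w dg : List Char) (hw : w ≠ []) :
    ∀ (fuel start : Nat) (t : PySem.Dict Int (List Char)) (i : Nat),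
      start ≤ cs.length → cs.length - start < fuel →
      (pvOccLoop cs w dg fuel (PySem.Chars.findFrom cs w (start : Int) none) t).get? (i : Int)
        = if start ≤ i ∧ w <+: cs.drop i then some dg else t.get? (i : Int) := by
  intro fuel
  induction fuel with
  | zero => intro start t i h1 h2; omega
  | succ fuel ih =>
    intro start t i hstart hfuel
    by_cases hidx : PySem.Chars.findFrom cs w (start : Int) none = -1
    · simp only [pvOccLoop, hidx, beq_self_eq_true, if_true]
      rw [if_neg]
      rintro ⟨hsi, hpre⟩
      have hnin : ¬ w <:+: cs.drop start :=
        (PySem.Chars.findFrom_natCast_eq_neg_one_iff cs w start hstart).mp hidx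
      apply hnin
      have hdd : cs.drop i = (cs.drop start).drop (i - start) := by
        rw [List.drop_drop]; congr 1; omega
      rw [hdd] at hpre
      exact hpre.isInfix.trans (List.drop_suffix _ _).isInfix
    · obtain ⟨hge, hpre, hmin⟩ := PySem.Chars.findFrom_natCast_spec cs w start hstart hidx
      set idx := PySem.Chars.findFrom cs w (start : Int) none with hidxdef
      have hidx0 : 0 ≤ idx := le_trans (by exact_mod_cast Nat.zero_le start) hge
      set j := idx.toNat with hjdef
      have hj : idx = (j : Int) := (Int.toNat_of_nonneg hidx0).symm
      have hjlt : j < cs.length := by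
        have hne : cs.drop j ≠ [] := by
          intro hnil; rw [hnil] at hpre; exact hw (List.prefix_nil.mp hpre)
        rw [ne_eq, List.drop_eq_nil_iff] at hne
        omega
      have hsj : start ≤ j := by
        rw [hj] at hge; exact_mod_cast hge
      simp only [pvOccLoop]
      rw [if_neg (by simp [hidx])]
      have harg : idx + 1 = ((j + 1 : Nat) : Int) := by rw [hj]; push_cast; ring
      rw [harg, ih (j + 1) (t.insert idx dg) i (by omega) (by omega)]
      rw [PySem.Dict.get?_insert]
      by_cases hc1 : j + 1 ≤ i ∧ w <+: cs.drop i
      · rw [if_pos hc1, if_pos ⟨by omega, hc1.2⟩]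
      · rw [if_neg hc1]
        by_cases hij : i = j
        · subst hij
          rw [if_pos (by rw [hj]), if_pos ⟨hsj, hpre⟩]
        · rw [if_neg (by rw [hj]; exact_mod_cast hij)]
          rw [if_neg]
          rintro ⟨hsi, hpre'⟩
          by_cases hlt : i < j
          · exact hmin i hsi hlt hpre'
          · exact hc1 ⟨by omega, hpre'⟩

lemma pv_filter_singleton {α : Type} {C : α → Bool} {L : List α}
    (h : L.Pairwise (fun p q => ¬(C p = true ∧ C q = true)))
    {p : α} {rest : List α} (hf : L.filter C = p :: rest) : rest = [] := by
  have hpw : (L.filter C).Pairwise (fun p q => ¬(C p = true ∧ C q = true)) :=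
    h.sublist List.filter_sublist
  rw [hf] at hpw
  cases rest with
  | nil => rfl
  | cons q rest2 =>
    exfalso
    have hR := (List.pairwise_cons.mp hpw).1 q (by simp)
    have hpmem : p ∈ L.filter C := by rw [hf]; simp
    have hqmem : q ∈ L.filter C := by rw [hf]; simp
    exact hR ⟨(List.mem_filter.mp hpmem).2, (List.mem_filter.mp hqmem).2⟩

lemma pv_words_pairwise (s : List Char) :
    pvWordsB.Pairwise (fun p q => ¬(p.1.toList.isPrefixOf s = true ∧ q.1.toList.isPrefixOf s = true)) := by
  have key : ∀ (w1 w2 : List Char), w1.isPrefixOf w2 = false → w2.isPrefixOf w1 = false →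
      ¬(w1.isPrefixOf s = true ∧ w2.isPrefixOf s = true) := by
    intro w1 w2 h1 h2 ⟨a, b⟩
    rw [List.isPrefixOf_iff_prefix] at a b
    rcases List.prefix_or_prefix_of_prefix a b with h | h
    · rw [← List.isPrefixOf_iff_prefix] at h; simp [h] at h1
    · rw [← List.isPrefixOf_iff_prefix] at h; simp [h] at h2
  have hnp : pvWordsB.Pairwise (fun p q => p.1.toList.isPrefixOf q.1.toList = false ∧ q.1.toList.isPrefixOf p.1.toList = false) := by decide
  exact hnp.imp (fun h => key _ _ h.1 h.2)

lemma pv_no_word_at_digit (s : List Char) (hd : PySem.Chars.isdigit (s.getD 0 ' ') = true) :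
    ∀ p ∈ pvWordsB, p.1.toList.isPrefixOf s = false := by
  intro p hp
  rw [Bool.eq_false_iff]
  intro htrue
  rw [List.isPrefixOf_iff_prefix] at htrue
  obtain ⟨r, hr⟩ := htrue
  rw [← hr] at hd
  fin_cases hp <;>
    (rw [List.getD_append _ _ _ _ (by decide)] at hd; exact absurd hd (by decide))

lemma pv_phase2_get (cs : List Char) (k : Nat) :
    ∀ (L : List (String × String)) (t : PySem.Dict Int (List Char)),
      (∀ p ∈ L, p.1.toList ≠ []) →
      L.Pairwise (fun p q => ¬(p.1.toList.isPrefixOf (cs.drop k) = true ∧ q.1.toList.isPrefixOf (cs.drop k) = true)) →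
      (L.foldl (fun tb p => pvOccLoop cs p.1.toList p.2.toList (cs.length + 1) (PySem.Chars.find cs p.1.toList) tb) t).get? (k : Int)
        = match L.filter (fun p => p.1.toList.isPrefixOf (cs.drop k)) with
          | [] => t.get? (k : Int)
          | p :: _ => some p.2.toList := by
  intro L
  induction L with
  | nil => intro t _ _; rfl
  | cons p L2 ih =>
    intro t hne hpw
    rw [List.foldl_cons]
    have hocc : (pvOccLoop cs p.1.toList p.2.toList (cs.length + 1) (PySem.Chars.find cs p.1.toList) t).get? (k : Int)
        = if p.1.toList <+: cs.drop k then some p.2.toList else t.get? (k : Int) := by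
      have h0 : PySem.Chars.find cs p.1.toList = PySem.Chars.findFrom cs p.1.toList ((0 : Nat) : Int) none := by
        rw [Nat.cast_zero, PySem.Chars.findFrom_zero]
      rw [h0, pv_occ_get cs p.1.toList p.2.toList (hne p (List.mem_cons_self)) (cs.length + 1) 0 t k (Nat.zero_le _) (by omega)]
      simp
    by_cases hp : p.1.toList.isPrefixOf (cs.drop k) = true
    · have hfil : L2.filter (fun q => q.1.toList.isPrefixOf (cs.drop k)) = [] := by
        rw [List.filter_eq_nil_iff]
        intro q hq
        have := (List.pairwise_cons.mp hpw).1 q hq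
        simp only [Bool.not_eq_true]
        by_contra hq2
        exact this ⟨hp, by simpa using hq2⟩
      rw [ih _ (fun q hq => hne q (List.mem_cons_of_mem _ hq)) (List.pairwise_cons.mp hpw).2]
      simp only [List.filter_cons, hp, if_true, hfil]
      rw [hocc, if_pos (List.isPrefixOf_iff_prefix.mp hp)]
    · have hp2 : p.1.toList.isPrefixOf (cs.drop k) = false := by
        rw [Bool.eq_false_iff]; exact hp
      rw [ih _ (fun q hq => hne q (List.mem_cons_of_mem _ hq)) (List.pairwise_cons.mp hpw).2]
      simp only [List.filter_cons, hp2, Bool.false_eq_true, if_false]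
      cases hfil : L2.filter (fun q => q.1.toList.isPrefixOf (cs.drop k)) with
      | nil =>
        rw [hocc, if_neg (by rw [← List.isPrefixOf_iff_prefix]; simp [hp2])]
      | cons q rest => rfl

lemma pv_table_get (cs : List Char) (k : Nat) (hk : k < cs.length) :
    (pvWordsB.foldl
        (fun tb p => pvOccLoop cs p.1.toList p.2.toList (cs.length + 1) (PySem.Chars.find cs p.1.toList) tb)
        ((PySem.List.enumerate cs 0).foldl
          (fun tb p => if PySem.Chars.isdigit p.2 then tb.insert p.1 [p.2] else tb)
          (PySem.Dict.empty : PySem.Dict Int (List Char)))).getD (k : Int) []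
      = pvTok cs k := by
  have henum : (PySem.List.enumerate cs 0).foldl
      (fun tb p => if PySem.Chars.isdigit p.2 then tb.insert p.1 [p.2] else tb)
      (PySem.Dict.empty : PySem.Dict Int (List Char))
      = (List.range cs.length).foldl
          (fun tb j => if PySem.Chars.isdigit (cs.getD j ' ') then tb.insert (j : Int) [cs.getD j ' '] else tb)
          (PySem.Dict.empty : PySem.Dict Int (List Char)) := by
    rw [PySem.List.enumerate_eq_map_pyRange cs ' ']
    simp only [PySem.List.len_eq, PySem.List.pyRange_zero_natCast, List.map_map, List.foldl_map,
      Function.comp_def, PySem.List.pyGetD_natCast]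
  rw [henum, PySem.Dict.getD_eq_get?_getD]
  rw [pv_phase2_get cs k pvWordsB _ (by decide) (pv_words_pairwise (cs.drop k))]
  have hdrop : (cs.drop k).getD 0 ' ' = cs.getD k ' ' := by
    simp [List.getD, List.getElem?_drop]
  by_cases hd : PySem.Chars.isdigit (cs.getD k ' ') = true
  · have hall : ∀ p ∈ pvWordsB, p.1.toList.isPrefixOf (cs.drop k) = false :=
      pv_no_word_at_digit (cs.drop k) (by rw [hdrop]; exact hd)
    have hfil : pvWordsB.filter (fun p => p.1.toList.isPrefixOf (cs.drop k)) = [] :=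
      List.filter_eq_nil_iff.mpr (fun p hp => by simp [hall p hp])
    rw [hfil]
    rw [pv_phase1_get cs k cs.length, if_pos ⟨hk, hd⟩]
    rw [pvTok, if_pos hd]
    rfl
  · rw [pvTok, if_neg hd]
    cases hfil : pvWordsB.filter (fun p => p.1.toList.isPrefixOf (cs.drop k)) with
    | nil =>
      rw [pv_phase1_get cs k cs.length, if_neg (by rintro ⟨h1, h2⟩; exact hd h2)]
      rfl
    | cons p rest =>
      have hrest : rest = [] := pv_filter_singleton (pv_words_pairwise (cs.drop k)) hfil
      subst hrest
      simp


lemma pv_B_eq (line : String) :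
    extract_digits_from_string_and_translate_text_to_digits_alt line
      = String.ofList ((List.range line.toList.length).flatMap (pvTok line.toList)) := by
  unfold extract_digits_from_string_and_translate_text_to_digits_alt
  dsimp only
  rw [pv_join_nil]
  simp only [PySem.Str.len_eq, PySem.List.pyRange_zero_natCast, List.map_map, Function.comp_def]
  congr 1
  rw [List.flatMap_def]
  congr 1
  apply List.map_congr_left
  intro k hk
  exact pv_table_get line.toList k (List.mem_range.mp hk)

-- ===== VERDICT (by name: the statement is the Claim_ definition above) =====
theorem extract_digits_from_string_and_translate_text_to_digits_spec : Claim_equal_extract_digits_from_string_and_translate_text_to_digits := by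
  intro line _
  unfold Spec_extract_digits_from_string_and_translate_text_to_digits
  rw [pv_A_eq, pv_B_eq]
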